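-- pv_equiv track=rewrite | github.com/celjensen/Scrabble | dicts_utils.py | create_scrabble_dict
-- ===== SOURCE A (Python) =====
-- def create_scrabble_dict(l):
--     d = {}
--     for word in l:
--         n = len(word)
--         if n not in d:
--             d[n] = [word]
--         else:
--             d[n].append(word)
--     for key in d:
--         d[key] = {}
--         for word in l:
--             if len(word) == key:
--                 if word[0] not in d[key]:
--                     d[key][word[0]] = [word]
--                 else:
--                     d[key][word[0]].append(word)
--     return d
-- ===== SOURCE B (Python) =====
-- def create_scrabble_dict(l):
--     d = {}
--     for word in l:
--         d.setdefault(len(word), {}).setdefault(word[0], []).append(word)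
--     return d
-- ===== Notes on version B (the rewrite author's own statement) =====
-- stated objective: alternative
-- what changed: B builds the nested dict (length -> first letter -> words) in a single pass with setdefault, instead of A's first pass grouping by length followed by one full rescan of the list per distinct length; intended as faster (O(K*N) -> O(N)) but a timing run measured only ~1.6x inconsistently, so no speed is claimed.
import Mathlib
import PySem

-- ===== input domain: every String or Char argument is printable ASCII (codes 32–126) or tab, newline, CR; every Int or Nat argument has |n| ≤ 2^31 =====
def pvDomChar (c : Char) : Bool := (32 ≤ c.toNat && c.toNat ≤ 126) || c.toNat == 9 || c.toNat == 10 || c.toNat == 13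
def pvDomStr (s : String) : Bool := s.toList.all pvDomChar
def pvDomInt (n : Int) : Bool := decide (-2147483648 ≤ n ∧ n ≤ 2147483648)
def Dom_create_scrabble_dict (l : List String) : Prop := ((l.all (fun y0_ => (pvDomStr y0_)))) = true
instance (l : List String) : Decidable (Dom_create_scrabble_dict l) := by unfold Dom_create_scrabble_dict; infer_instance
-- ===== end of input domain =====

-- B replaces A's per-distinct-length rescans of the whole list by one single pass
-- building the nested dict directly in a single pass (objective: alternative).

-- word[0] as a one-character Python string (both programs evaluate it only on
-- nonempty words, which Pre_ guarantees; the "" fallback is never reached there)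
def pvFirst (w : String) : String :=
  match PySem.Str.pyGet? w 0 with
  | some c => String.ofList [c]
  | none => ""

-- ===== PORT A =====
-- A's first loop body: group words by length
def pvAStep (d : PySem.Dict Int (List String)) (word : String) : PySem.Dict Int (List String) :=
  let n : Int := PySem.Str.len word
  if d.contains n = false then d.insert n [word]
  else d.insert n (d.getD n [] ++ [word])

-- A's second (inner) loop body for a fixed outer key: rescan l, keep words of length key,
-- group them by first letter
def pvInnerStep (key : Int) (inn : PySem.Dict String (List String)) (word : String) :
    PySem.Dict String (List String) :=
  if PySem.Str.len word == key then
    if inn.contains (pvFirst word) = false then inn.insert (pvFirst word) [word]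
    else inn.insert (pvFirst word) (inn.getD (pvFirst word) [] ++ [word])
  else inn

def create_scrabble_dict (l : List String) : List (Int × List (String × List String)) :=
  let d : PySem.Dict Int (List String) := l.foldl pvAStep PySem.Dict.empty
  d.keys.map (fun key => (key, (l.foldl (pvInnerStep key) PySem.Dict.empty).items))

-- ===== PORT B =====
-- B's single-pass loop body: d.setdefault(len(word), {}).setdefault(word[0], []).append(word)
def pvBStep (d : PySem.Dict Int (PySem.Dict String (List String))) (word : String) :
    PySem.Dict Int (PySem.Dict String (List String)) :=
  let inner := d.getD (PySem.Str.len word) PySem.Dict.empty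
  d.insert (PySem.Str.len word)
    (inner.insert (pvFirst word) (inner.getD (pvFirst word) [] ++ [word]))

def create_scrabble_dict_alt (l : List String) : List (Int × List (String × List String)) :=
  (l.foldl pvBStep PySem.Dict.empty).items.map (fun p => (p.1, p.2.items))

-- ===== PRECONDITION & SPEC =====
-- Pre_ excludes lists containing the empty string: there A (and B) raise IndexError on word[0].
def Pre_create_scrabble_dict (l : List String) : Prop := "" ∉ l
instance (l : List String) : Decidable (Pre_create_scrabble_dict l) := by
  unfold Pre_create_scrabble_dict; infer_instance

def pvWitness_create_scrabble_dict : List String := ["cat", "dog", "at", "x", "cab"]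

def Spec_create_scrabble_dict (l : List String) (out : List (Int × List (String × List String))) : Prop := out = create_scrabble_dict_alt l
instance (l : List String) (out : List (Int × List (String × List String))) : Decidable (Spec_create_scrabble_dict l out) := by unfold Spec_create_scrabble_dict; infer_instance

-- ===== CLAIM (what is proved, stated in full; the proofs are below) =====
def Claim_equal_create_scrabble_dict : Prop := ∀ (l : List String), Dom_create_scrabble_dict l → Pre_create_scrabble_dict l → Spec_create_scrabble_dict l (create_scrabble_dict l)

-- ===== LEMMAS AND PROOFS =====

-- the slot of key k in B's running dict is exactly A's inner fold for key k
lemma pvSlot (l : List String) (D : PySem.Dict Int (PySem.Dict String (List String))) (k : Int) :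
    (l.foldl pvBStep D).getD k PySem.Dict.empty =
      l.foldl (pvInnerStep k) (D.getD k PySem.Dict.empty) := by
  induction l generalizing D with
  | nil => rfl
  | cons w t ih =>
    simp only [List.foldl_cons]
    rw [ih]
    congr 1
    simp only [pvBStep, pvInnerStep, PySem.Dict.getD_insert]
    by_cases hk : k = PySem.Str.len w
    · rw [if_pos hk, hk]
      rw [if_pos (by simp : (PySem.Str.len w == PySem.Str.len w) = true)]
      by_cases hc : (D.getD (PySem.Str.len w) PySem.Dict.empty).contains (pvFirst w) = false
      · rw [if_pos hc, PySem.Dict.getD_of_not_contains (h := hc), List.nil_append]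
      · rw [if_neg hc]
    · have hb : (PySem.Str.len w == k) = false := beq_eq_false_iff_ne.mpr (Ne.symm hk)
      rw [if_neg hk, hb]
      simp

-- A's first loop inserts at key (len word) in both branches
lemma pvAStep_eq :
    pvAStep = (fun (d : PySem.Dict Int (List String)) (word : String) =>
        d.insert (PySem.Str.len word)
          (if d.contains (PySem.Str.len word) = false then [word]
           else d.getD (PySem.Str.len word) [] ++ [word])) := by
  funext d word
  simp only [pvAStep]
  split <;> rfl

lemma pvBStep_eq :
    pvBStep = (fun (d : PySem.Dict Int (PySem.Dict String (List String))) (word : String) =>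
        d.insert (PySem.Str.len word)
          ((d.getD (PySem.Str.len word) PySem.Dict.empty).insert (pvFirst word)
            ((d.getD (PySem.Str.len word) PySem.Dict.empty).getD (pvFirst word) [] ++ [word]))) :=
  rfl

-- keys of A's first-phase dict = keys of B's dict (the lengths in first-occurrence order)
lemma pvKeys_eq (l : List String) :
    (l.foldl pvAStep PySem.Dict.empty).keys = (l.foldl pvBStep PySem.Dict.empty).keys := by
  rw [pvAStep_eq, pvBStep_eq,
    PySem.Dict.keys_foldl_insert_key l PySem.Str.len
      (fun d word => if d.contains (PySem.Str.len word) = false then [word]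
                     else d.getD (PySem.Str.len word) [] ++ [word]),
    PySem.Dict.keys_foldl_insert_key l PySem.Str.len
      (fun d word => (d.getD (PySem.Str.len word) PySem.Dict.empty).insert (pvFirst word)
        ((d.getD (PySem.Str.len word) PySem.Dict.empty).getD (pvFirst word) [] ++ [word]))]
  rfl

lemma pvKeysB_nodup (l : List String) : (l.foldl pvBStep PySem.Dict.empty).keys.Nodup := by
  rw [pvBStep_eq]
  exact PySem.Dict.nodup_keys_foldl_insert_key l PySem.Str.len _ _ (by simp)

-- ===== VERDICT (by name: the statement is the Claim_ definition above) =====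
theorem create_scrabble_dict_spec : Claim_equal_create_scrabble_dict := by
  intro l _ _
  show create_scrabble_dict l = create_scrabble_dict_alt l
  have hA : create_scrabble_dict l = List.map
      (fun key => (key, (List.foldl (pvInnerStep key) PySem.Dict.empty l).items))
      (List.foldl pvAStep PySem.Dict.empty l).keys := rfl
  have hB : create_scrabble_dict_alt l =
      ((l.foldl pvBStep PySem.Dict.empty).items).map (fun p => (p.1, p.2.items)) := rfl
  rw [hA, hB, PySem.Dict.items_eq_map_keys _ (pvKeysB_nodup l) PySem.Dict.empty, List.map_map,
    pvKeys_eq l]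
  apply List.map_congr_left
  intro k _
  simp only [Function.comp]
  rw [pvSlot l PySem.Dict.empty k, PySem.Dict.getD_empty]
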